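-- pv_equiv track=rewrite | github.com/AvrilMZ/Teoria_de_Algoritmos | Actividades/7 - Reducciones/ej16.py | verificador_hs
-- ===== SOURCE A (Python) =====
-- def verificador_hs(A, M, C, k):
-- 	if len(C) > k:
-- 		return False
--
-- 	for elem in C:
-- 		if elem not in A:
-- 			return False
--
-- 	for b in M:
-- 		if not any(elem in C for elem in b):
-- 			return False
--
-- 	return True
-- ===== SOURCE B (Python) =====
-- def verificador_hs(A, M, C, k):
--     if len(C) > k:
--         return False
--     for elem in C:
--         if elem not in A:
--             return False
--     covered = set()
--     for elem in C:
--         for i, b in enumerate(M):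
--             if elem in b:
--                 covered.add(i)
--     return len(covered) == len(M)
-- ===== Notes on version B (the rewrite author's own statement) =====
-- stated objective: alternative
-- what changed: Inverted the nested constraint check: instead of testing each constraint of M independently with any(), B iterates over the candidate elements of C, accumulates the indices of the constraints each element covers into a set, and finally compares the number of covered indices with len(M).
import Mathlib
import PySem

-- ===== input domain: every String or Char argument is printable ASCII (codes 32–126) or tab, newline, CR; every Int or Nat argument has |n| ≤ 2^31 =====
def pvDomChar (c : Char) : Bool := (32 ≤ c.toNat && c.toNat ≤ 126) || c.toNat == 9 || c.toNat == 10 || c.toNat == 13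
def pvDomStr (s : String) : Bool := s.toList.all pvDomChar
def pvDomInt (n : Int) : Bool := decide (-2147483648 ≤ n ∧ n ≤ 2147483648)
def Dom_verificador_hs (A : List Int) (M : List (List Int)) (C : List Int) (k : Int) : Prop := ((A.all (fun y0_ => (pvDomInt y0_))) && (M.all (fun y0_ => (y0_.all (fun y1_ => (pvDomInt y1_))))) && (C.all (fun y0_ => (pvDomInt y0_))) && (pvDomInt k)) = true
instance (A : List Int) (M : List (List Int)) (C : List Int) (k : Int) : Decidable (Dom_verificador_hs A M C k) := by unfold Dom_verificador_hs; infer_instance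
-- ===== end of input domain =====

-- B inverts A's constraint check: it collects the set of covered constraint indices per
-- candidate element and compares its size with |M|, instead of testing each constraint with any().

-- ===== PORT A =====
-- "for elem in C: if elem not in A: return False" (early-return loop)
def hsLoopElems (C A : List Int) : Option Bool :=
  match C with
  | [] => none
  | e :: rest => if A.contains e then hsLoopElems rest A else some false

-- "for b in M: if not any(elem in C for elem in b): return False"
def hsLoopConstr (M : List (List Int)) (C : List Int) : Option Bool :=
  match M with
  | [] => none
  | b :: rest => if b.any (fun e => C.contains e) then hsLoopConstr rest C else some false

def verificador_hs (A : List Int) (M : List (List Int)) (C : List Int) (k : Int) : Bool :=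
  if (C.length : Int) > k then false
  else
    match hsLoopElems C A with
    | some r => r
    | none =>
      match hsLoopConstr M C with
      | some r => r
      | none => true

-- ===== PORT B =====
-- covered = set(); for elem in C: for i, b in enumerate(M): if elem in b: covered.add(i)
def hsCovered (M : List (List Int)) (C : List Int) : PySem.Set Int :=
  C.foldl (fun cov e =>
      (PySem.List.enumerate M).foldl
        (fun cov p => if p.2.contains e then PySem.Set.add cov p.1 else cov) cov)
    PySem.Set.empty

def verificador_hs_alt (A : List Int) (M : List (List Int)) (C : List Int) (k : Int) : Bool :=
  if (C.length : Int) > k then false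
  else if C.all (fun e => A.contains e) then
    decide (((hsCovered M C).length : Int) = (M.length : Int))
  else false

-- ===== PRECONDITION & SPEC =====
def Spec_verificador_hs (A : List Int) (M : List (List Int)) (C : List Int) (k : Int) (out : Bool) : Prop := out = verificador_hs_alt A M C k
instance (A : List Int) (M : List (List Int)) (C : List Int) (k : Int) (out : Bool) : Decidable (Spec_verificador_hs A M C k out) := by unfold Spec_verificador_hs; infer_instance

-- ===== CLAIM (what is proved, stated in full; the proofs are below) =====
def Claim_equal_verificador_hs : Prop := ∀ (A : List Int) (M : List (List Int)) (C : List Int) (k : Int), Dom_verificador_hs A M C k → Spec_verificador_hs A M C k (verificador_hs A M C k)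

-- ===== LEMMAS AND PROOFS =====

-- the list of all constraint indices, as Ints
def idxList (n : Nat) : List Int := (List.range n).map Int.ofNat

theorem mem_idxList (n : Nat) (i : Int) : i ∈ idxList n ↔ ∃ j : Nat, j < n ∧ i = (j : Int) := by
  unfold idxList
  simp only [List.mem_map, List.mem_range]
  constructor
  · rintro ⟨j, hj, rfl⟩; exact ⟨j, hj, rfl⟩
  · rintro ⟨j, hj, rfl⟩; exact ⟨j, hj, rfl⟩

theorem nodup_idxList (n : Nat) : (idxList n).Nodup :=
  (List.nodup_range).map (fun a b h => Int.ofNat.inj h)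

theorem length_idxList (n : Nat) : (idxList n).length = n := by
  simp [idxList]

theorem hsLoopElems_none_iff (C A : List Int) :
    hsLoopElems C A = none ↔ C.all (fun e => A.contains e) = true := by
  induction C with
  | nil => simp [hsLoopElems]
  | cons e rest ih =>
    simp only [hsLoopElems, List.all_cons, Bool.and_eq_true]
    split_ifs with h
    · simp only [List.contains_iff_mem] at h
      simp [h, ih]
    · simp only [List.contains_iff_mem] at h
      simp [h]

theorem hsLoopConstr_none_iff (M : List (List Int)) (C : List Int) :
    hsLoopConstr M C = none ↔ ∀ b ∈ M, ∃ e ∈ b, e ∈ C := by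
  induction M with
  | nil => simp [hsLoopConstr]
  | cons b rest ih =>
    simp only [hsLoopConstr]
    split_ifs with h
    · rw [ih]
      simp only [List.any_eq_true, List.contains_iff_mem] at h
      constructor
      · rintro hall b' hb'
        rw [List.mem_cons] at hb'
        rcases hb' with hb' | hb'
        · subst hb'; exact h
        · exact hall b' hb'
      · intro hall b' hb'; exact hall b' (List.mem_cons_of_mem _ hb')
    · constructor
      · intro hc; cases hc
      · intro hall
        exfalso; apply h
        simp only [List.any_eq_true, List.contains_iff_mem]
        exact hall b List.mem_cons_self

theorem hsLoopConstr_isSome (M : List (List Int)) (C : List Int) (h : hsLoopConstr M C ≠ none) :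
    hsLoopConstr M C = some false := by
  induction M with
  | nil => simp [hsLoopConstr] at h
  | cons b rest ih =>
    simp only [hsLoopConstr] at h ⊢
    split_ifs at h ⊢ with hb
    · exact ih h
    · rfl

theorem hsLoopElems_isSome (C A : List Int) (h : hsLoopElems C A ≠ none) :
    hsLoopElems C A = some false := by
  induction C with
  | nil => simp [hsLoopElems] at h
  | cons e rest ih =>
    simp only [hsLoopElems] at h ⊢
    split_ifs at h ⊢ with he
    · exact ih h
    · rfl

-- membership in the inner (per-element) fold over the enumerated constraints
theorem mem_hsInner (M : List (List Int)) (e : Int) (cov : PySem.Set Int) (i : Int) (s : Int) :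
    i ∈ (PySem.List.enumerate M s).foldl
        (fun cov p => if p.2.contains e then PySem.Set.add cov p.1 else cov) cov ↔
      i ∈ cov ∨ ∃ p ∈ PySem.List.enumerate M s, p.1 = i ∧ e ∈ p.2 := by
  induction M generalizing cov s with
  | nil => simp [PySem.List.enumerate_nil]
  | cons b rest ih =>
    simp only [PySem.List.enumerate_cons, List.foldl_cons, List.mem_cons]
    rw [ih]
    by_cases hb : e ∈ b
    · rw [if_pos (by simpa using hb)]
      simp only [PySem.Set.mem_add]
      constructor
      · rintro (⟨hc | hc⟩ | ⟨p, hp, h1, h2⟩)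
        · exact Or.inl hc
        · exact Or.inr ⟨(s, b), Or.inl rfl, hc.symm, hb⟩
        · exact Or.inr ⟨p, Or.inr hp, h1, h2⟩
      · rintro (hc | ⟨p, hp | hp, h1, h2⟩)
        · exact Or.inl (Or.inl hc)
        · subst hp; exact Or.inl (Or.inr h1.symm)
        · exact Or.inr ⟨p, hp, h1, h2⟩
    · rw [if_neg (by simpa using hb)]
      constructor
      · rintro (hc | ⟨p, hp, h1, h2⟩)
        · exact Or.inl hc
        · exact Or.inr ⟨p, Or.inr hp, h1, h2⟩
      · rintro (hc | ⟨p, hp | hp, h1, h2⟩)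
        · exact Or.inl hc
        · exact absurd (by rw [hp] at h2; exact h2) hb
        · exact Or.inr ⟨p, hp, h1, h2⟩

theorem nodup_hsInner (M : List (List Int)) (e : Int) (cov : PySem.Set Int) (s : Int)
    (h : cov.Nodup) :
    ((PySem.List.enumerate M s).foldl
        (fun cov p => if p.2.contains e then PySem.Set.add cov p.1 else cov) cov).Nodup := by
  induction M generalizing cov s with
  | nil => simpa [PySem.List.enumerate_nil] using h
  | cons b rest ih =>
    simp only [PySem.List.enumerate_cons, List.foldl_cons]
    apply ih
    split_ifs with hb
    · exact PySem.Set.nodup_add cov s h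
    · exact h

theorem mem_hsCovered (M : List (List Int)) (C : List Int) (i : Int) :
    i ∈ hsCovered M C ↔ ∃ p ∈ PySem.List.enumerate M, p.1 = i ∧ ∃ e ∈ C, e ∈ p.2 := by
  unfold hsCovered
  induction C using List.reverseRecOn with
  | nil => simp [PySem.Set.empty]
  | append_singleton rest e ih =>
    rw [List.foldl_append, List.foldl_cons, List.foldl_nil, mem_hsInner, ih]
    constructor
    · rintro (⟨p, hp, h1, e', he', h2⟩ | ⟨p, hp, h1, h2⟩)
      · exact ⟨p, hp, h1, e', by simp [he'], h2⟩
      · exact ⟨p, hp, h1, e, by simp, h2⟩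
    · rintro ⟨p, hp, h1, e', he', h2⟩
      rcases List.mem_append.mp he' with he' | he'
      · exact Or.inl ⟨p, hp, h1, e', he', h2⟩
      · simp only [List.mem_singleton] at he'; subst he'
        exact Or.inr ⟨p, hp, h1, h2⟩

theorem nodup_hsCovered (M : List (List Int)) (C : List Int) : (hsCovered M C).Nodup := by
  unfold hsCovered
  induction C using List.reverseRecOn with
  | nil => simp [PySem.Set.empty]
  | append_singleton rest e ih =>
    rw [List.foldl_append, List.foldl_cons, List.foldl_nil]
    exact nodup_hsInner _ _ _ _ ih

-- characterisation via natural indices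
theorem mem_hsCovered_nat (M : List (List Int)) (C : List Int) (i : Int) :
    i ∈ hsCovered M C ↔ ∃ j : Nat, ∃ h : j < M.length, i = (j : Int) ∧ ∃ e ∈ C, e ∈ M[j] := by
  rw [mem_hsCovered]
  constructor
  · rintro ⟨p, hp, h1, he⟩
    rw [PySem.List.mem_enumerate_iff] at hp
    rcases hp with ⟨j, hj, rfl⟩
    exact ⟨j, hj, by simpa using h1.symm, he⟩
  · rintro ⟨j, hj, rfl, he⟩
    refine ⟨((j : Int), M[j]), ?_, by simp, he⟩
    rw [PySem.List.mem_enumerate_iff]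
    exact ⟨j, hj, by simp⟩

-- the covered set is contained in the list of all indices
theorem hsCovered_subset (M : List (List Int)) (C : List Int) :
    hsCovered M C ⊆ idxList M.length := by
  intro i hi
  rw [mem_hsCovered_nat] at hi
  rcases hi with ⟨j, hj, rfl, _⟩
  exact (mem_idxList _ _).mpr ⟨j, hj, rfl⟩

theorem hsCovered_len_iff (M : List (List Int)) (C : List Int) :
    (hsCovered M C).length = M.length ↔ ∀ b ∈ M, ∃ e ∈ b, e ∈ C := by
  have hnd := nodup_hsCovered M C
  have hsub : (hsCovered M C).Subperm (idxList M.length) :=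
    List.subperm_of_subset hnd (hsCovered_subset M C)
  constructor
  · intro hlen b hb
    have hperm : (hsCovered M C).Perm (idxList M.length) :=
      hsub.perm_of_length_le (by rw [length_idxList, hlen])
    rcases List.mem_iff_getElem.mp hb with ⟨j, hj, rfl⟩
    have : (j : Int) ∈ hsCovered M C := by
      rw [hperm.mem_iff, mem_idxList]
      exact ⟨j, hj, rfl⟩
    rw [mem_hsCovered_nat] at this
    rcases this with ⟨j', hj', hji, e, he, heb⟩
    have : j' = j := by exact_mod_cast hji.symm
    subst this
    exact ⟨e, heb, he⟩
  · intro hall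
    have hsubR : idxList M.length ⊆ hsCovered M C := by
      intro i hi
      rcases (mem_idxList _ _).mp hi with ⟨j, hj, rfl⟩
      rw [mem_hsCovered_nat]
      rcases hall M[j] (List.getElem_mem hj) with ⟨e, heb, heC⟩
      exact ⟨j, hj, rfl, e, heC, heb⟩
    have h2 : (idxList M.length).Subperm (hsCovered M C) :=
      List.subperm_of_subset (nodup_idxList _) hsubR
    have := le_antisymm hsub.length_le h2.length_le
    rw [length_idxList] at this
    exact this

-- ===== VERDICT (by name: the statement is the Claim_ definition above) =====
theorem verificador_hs_spec : Claim_equal_verificador_hs := by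
  intro A M C k _
  unfold Spec_verificador_hs verificador_hs verificador_hs_alt
  by_cases hk : (C.length : Int) > k
  · simp [hk]
  · simp only [hk, if_false]
    by_cases hE : hsLoopElems C A = none
    · have hall := (hsLoopElems_none_iff C A).mp hE
      simp only [hE, hall, if_true]
      by_cases hM : hsLoopConstr M C = none
      · have hcov := (hsLoopConstr_none_iff M C).mp hM
        have hlen : (hsCovered M C).length = M.length := (hsCovered_len_iff M C).mpr hcov
        simp [hM, hlen]
      · rw [hsLoopConstr_isSome M C hM]
        have hncov : ¬ ∀ b ∈ M, ∃ e ∈ b, e ∈ C :=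
          fun h => hM ((hsLoopConstr_none_iff M C).mpr h)
        have hne : (hsCovered M C).length ≠ M.length :=
          fun h => hncov ((hsCovered_len_iff M C).mp h)
        have hni : ¬ ((hsCovered M C).length : Int) = (M.length : Int) :=
          fun h => hne (by exact_mod_cast h)
        simp [hni]
    · rw [hsLoopElems_isSome C A hE]
      have hna : ¬ C.all (fun e => A.contains e) = true :=
        fun h => hE ((hsLoopElems_none_iff C A).mpr h)
      rw [if_neg hna]
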